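-- pv_equiv track=rewrite | github.com/RealBleedingLight/tab | guitar-teacher/guitar_teacher/core/analyzer.py | _detect_melodic_patterns
-- ===== SOURCE A (Python) =====
-- def _detect_melodic_patterns(pitch_classes):
--     """Detect simple melodic patterns from a list of pitch classes."""
--     if len(pitch_classes) < 3:
--         return []
--
--     patterns = []
--
--     # Check ascending
--     ascending = all(
--         pitch_classes[i] != pitch_classes[i + 1]
--         and (pitch_classes[i + 1] - pitch_classes[i]) % 12 <= 6
--         for i in range(len(pitch_classes) - 1)
--     )
--     if ascending:
--         patterns.append("ascending_run")
--
--     # Check descending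
--     descending = all(
--         pitch_classes[i] != pitch_classes[i + 1]
--         and (pitch_classes[i] - pitch_classes[i + 1]) % 12 <= 6
--         for i in range(len(pitch_classes) - 1)
--     )
--     if descending:
--         patterns.append("descending_run")
--
--     # Check chromatic
--     chromatic = all(
--         abs((pitch_classes[i + 1] - pitch_classes[i]) % 12) == 1
--         or abs((pitch_classes[i] - pitch_classes[i + 1]) % 12) == 1
--         for i in range(len(pitch_classes) - 1)
--     )
--     if chromatic and len(pitch_classes) >= 4:
--         patterns.append("chromatic")
--
--     # Check repeated note
--     if len(set(pitch_classes)) == 1: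
--         patterns.append("repeated_note")
--
--     return patterns
-- ===== SOURCE B (Python) =====
-- def _detect_melodic_patterns(pitch_classes):
--     """Single pass over adjacent pairs, maintaining one flag per pattern."""
--     if len(pitch_classes) < 3:
--         return []
--
--     is_ascending = is_descending = is_chromatic = all_same = True
--     first = pitch_classes[0]
--     prev = first
--     for cur in pitch_classes[1:]:
--         up = (cur - prev) % 12
--         down = (prev - cur) % 12
--         if prev == cur or up > 6:
--             is_ascending = False
--         if prev == cur or down > 6:
--             is_descending = False
--         if up != 1 and down != 1:
--             is_chromatic = False
--         if cur != first:
--             all_same = False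
--         prev = cur
--
--     patterns = []
--     if is_ascending:
--         patterns.append("ascending_run")
--     if is_descending:
--         patterns.append("descending_run")
--     if is_chromatic and len(pitch_classes) >= 4:
--         patterns.append("chromatic")
--     if all_same:
--         patterns.append("repeated_note")
--     return patterns
-- ===== Notes on version B (the rewrite author's own statement) =====
-- stated objective: alternative
-- what changed: replaced A's four independent scans (three all(...) generator passes over index ranges plus a set() construction) by a single pass over adjacent pairs that maintains four boolean flags and a running comparison with the first element
import Mathlib
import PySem

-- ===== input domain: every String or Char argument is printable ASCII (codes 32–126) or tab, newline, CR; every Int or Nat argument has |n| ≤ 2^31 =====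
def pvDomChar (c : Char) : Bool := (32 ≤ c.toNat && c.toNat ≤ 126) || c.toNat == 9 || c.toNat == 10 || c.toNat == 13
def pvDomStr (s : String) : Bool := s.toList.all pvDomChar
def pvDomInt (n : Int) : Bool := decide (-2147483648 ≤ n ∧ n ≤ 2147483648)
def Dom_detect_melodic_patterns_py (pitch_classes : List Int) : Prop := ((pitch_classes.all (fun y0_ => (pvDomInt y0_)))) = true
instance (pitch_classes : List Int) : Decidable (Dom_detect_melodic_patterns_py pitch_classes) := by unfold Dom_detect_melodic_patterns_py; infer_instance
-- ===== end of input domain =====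

-- B replaces A's four independent scans by a single pass over adjacent pairs maintaining four flags (objective: alternative).

-- ===== PORT A =====
def detect_melodic_patterns_py (pitch_classes : List Int) : List String :=
  if pitch_classes.length < 3 then [] else
    let n : Int := pitch_classes.length
    let ascending :=
      (PySem.List.pyRange 0 (n - 1) 1).all (fun i =>
        (!(PySem.List.pyGetD pitch_classes i 0 == PySem.List.pyGetD pitch_classes (i + 1) 0)) &&
        decide (PySem.Int.mod (PySem.List.pyGetD pitch_classes (i + 1) 0 - PySem.List.pyGetD pitch_classes i 0) 12 ≤ 6))
    let patterns : List String := []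
    let patterns := if ascending then patterns ++ ["ascending_run"] else patterns
    let descending :=
      (PySem.List.pyRange 0 (n - 1) 1).all (fun i =>
        (!(PySem.List.pyGetD pitch_classes i 0 == PySem.List.pyGetD pitch_classes (i + 1) 0)) &&
        decide (PySem.Int.mod (PySem.List.pyGetD pitch_classes i 0 - PySem.List.pyGetD pitch_classes (i + 1) 0) 12 ≤ 6))
    let patterns := if descending then patterns ++ ["descending_run"] else patterns
    let chromatic :=
      (PySem.List.pyRange 0 (n - 1) 1).all (fun i =>
        (|PySem.Int.mod (PySem.List.pyGetD pitch_classes (i + 1) 0 - PySem.List.pyGetD pitch_classes i 0) 12| == 1) ||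
        (|PySem.Int.mod (PySem.List.pyGetD pitch_classes i 0 - PySem.List.pyGetD pitch_classes (i + 1) 0) 12| == 1))
    let patterns := if chromatic && decide (4 ≤ pitch_classes.length) then patterns ++ ["chromatic"] else patterns
    let patterns := if (PySem.Set.ofList pitch_classes).length = 1 then patterns ++ ["repeated_note"] else patterns
    patterns

-- ===== PORT B =====
def detect_melodic_patterns_py_alt (pitch_classes : List Int) : List String :=
  if pitch_classes.length < 3 then [] else
    let first := PySem.List.pyGetD pitch_classes 0 0
    let st := (PySem.List.slice pitch_classes (some 1) none).foldl
      (fun (s : Bool × Bool × Bool × Bool × Int) cur =>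
        let prev := s.2.2.2.2
        let up := PySem.Int.mod (cur - prev) 12
        let down := PySem.Int.mod (prev - cur) 12
        let asc := if prev == cur || decide (6 < up) then false else s.1
        let desc := if prev == cur || decide (6 < down) then false else s.2.1
        let chrom := if (!(up == 1)) && (!(down == 1)) then false else s.2.2.1
        let same := if !(cur == first) then false else s.2.2.2.1
        (asc, desc, chrom, same, cur))
      (true, true, true, true, first)
    let patterns : List String := []
    let patterns := if st.1 then patterns ++ ["ascending_run"] else patterns
    let patterns := if st.2.1 then patterns ++ ["descending_run"] else patterns
    let patterns := if st.2.2.1 && decide (4 ≤ pitch_classes.length) then patterns ++ ["chromatic"] else patterns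
    let patterns := if st.2.2.2.1 then patterns ++ ["repeated_note"] else patterns
    patterns

-- ===== PRECONDITION & SPEC =====
def Spec_detect_melodic_patterns_py (pitch_classes : List Int) (out : List String) : Prop := out = detect_melodic_patterns_py_alt pitch_classes
instance (pitch_classes : List Int) (out : List String) : Decidable (Spec_detect_melodic_patterns_py pitch_classes out) := by unfold Spec_detect_melodic_patterns_py; infer_instance

-- ===== CLAIM (what is proved, stated in full; the proofs are below) =====
def Claim_equal_detect_melodic_patterns_py : Prop := ∀ (pitch_classes : List Int), Dom_detect_melodic_patterns_py pitch_classes → Spec_detect_melodic_patterns_py pitch_classes (detect_melodic_patterns_py pitch_classes)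

-- ===== LEMMAS AND PROOFS =====

-- A's 'all(... for i in range(len-1))' over indices equals an 'all' over adjacent pairs.
theorem allAdj_nat (P : Int → Int → Bool) : ∀ (pc : List Int),
    (List.range (pc.length - 1)).all (fun k => P (pc.getD k 0) (pc.getD (k + 1) 0))
    = (pc.zip pc.tail).all (fun p => P p.1 p.2) := by
  intro pc
  induction pc with
  | nil => rfl
  | cons x xs ih =>
    cases xs with
    | nil => rfl
    | cons y rest =>
      have h := ih
      simp only [List.length_cons, Nat.add_sub_cancel] at h ⊢
      rw [List.range_succ_eq_map]
      simp only [List.all_cons, List.all_map, List.zip_cons_cons, List.tail_cons,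
        Function.comp_def, List.getD_cons_succ, List.getD_cons_zero] at h ⊢
      rw [h]

theorem allAdj (P : Int → Int → Bool) (pc : List Int) :
    (PySem.List.pyRange 0 ((pc.length : Int) - 1) 1).all (fun i =>
      P (PySem.List.pyGetD pc i 0) (PySem.List.pyGetD pc (i + 1) 0))
    = (pc.zip pc.tail).all (fun p => P p.1 p.2) := by
  rw [PySem.List.pyRange_one, List.all_map]
  have hn : ((pc.length : Int) - 1 - 0).toNat = pc.length - 1 := by omega
  rw [hn]
  have hf : ((fun i => P (PySem.List.pyGetD pc i 0) (PySem.List.pyGetD pc (i + 1) 0)) ∘ fun k : Nat => (0 : Int) + k)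
      = fun k : Nat => P (pc.getD k 0) (pc.getD (k + 1) 0) := by
    funext k
    have h2 : ((k : Int) + 1) = ((k + 1 : Nat) : Int) := by push_cast; ring
    simp only [Function.comp_def, zero_add, h2, PySem.List.pyGetD_natCast]
  rw [hf, allAdj_nat]

-- B's fold over the tail computes each flag as an 'all' over adjacent pairs.
theorem foldFlags (first : Int) : ∀ (l : List Int) (prev : Int) (a d c s : Bool),
    l.foldl (fun (st : Bool × Bool × Bool × Bool × Int) cur =>
        let prev := st.2.2.2.2
        let up := PySem.Int.mod (cur - prev) 12
        let down := PySem.Int.mod (prev - cur) 12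
        let asc := if prev == cur || decide (6 < up) then false else st.1
        let desc := if prev == cur || decide (6 < down) then false else st.2.1
        let chrom := if (!(up == 1)) && (!(down == 1)) then false else st.2.2.1
        let same := if !(cur == first) then false else st.2.2.2.1
        (asc, desc, chrom, same, cur))
      (a, d, c, s, prev)
    = (a && ((prev :: l).zip l).all (fun p =>
          (!(p.1 == p.2)) && decide (PySem.Int.mod (p.2 - p.1) 12 ≤ 6)),
       d && ((prev :: l).zip l).all (fun p =>
          (!(p.1 == p.2)) && decide (PySem.Int.mod (p.1 - p.2) 12 ≤ 6)),
       c && ((prev :: l).zip l).all (fun p =>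
          (PySem.Int.mod (p.2 - p.1) 12 == 1) || (PySem.Int.mod (p.1 - p.2) 12 == 1)),
       s && l.all (fun x => x == first),
       l.getLastD prev) := by
  intro l
  induction l with
  | nil => intro prev a d c s; simp
  | cons x t ih =>
    intro prev a d c s
    rw [List.foldl_cons, ih]
    simp only [List.zip_cons_cons, List.all_cons, List.getLastD_cons, Prod.mk.injEq]
    refine ⟨?_, ?_, ?_, ?_, trivial⟩
    · by_cases hpc : prev = x
      · simp [hpc]
      · have hb : (prev == x) = false := by simp [hpc]
        by_cases h6 : (6 : Int) < (x - prev) % 12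
        · simp [hb, h6, not_le.mpr h6]
        · simp [hb, h6, not_lt.mp h6]
    · by_cases hpc : prev = x
      · simp [hpc]
      · have hb : (prev == x) = false := by simp [hpc]
        by_cases h6 : (6 : Int) < (prev - x) % 12
        · simp [hb, h6, not_le.mpr h6]
        · simp [hb, h6, not_lt.mp h6]
    · by_cases h1 : (x - prev) % 12 = 1
      · simp [h1]
      · by_cases h2 : (prev - x) % 12 = 1
        · simp [h2]
        · simp [h1, h2]
    · by_cases h : x = first
      · simp [h]
      · simp [h]

-- Nodup helper: len(set(pc)) == 1 means every element equals the head.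
theorem setLen_one (x : Int) (xs : List Int) :
    ((PySem.Set.ofList (x :: xs)).length = 1) ↔ (∀ c ∈ xs, c = x) := by
  constructor
  · intro h c hc
    rcases List.length_eq_one_iff.mp h with ⟨a, ha⟩
    have hx : x ∈ PySem.Set.ofList (x :: xs) := by
      rw [PySem.Set.mem_ofList]; simp
    have hcm : c ∈ PySem.Set.ofList (x :: xs) := by
      rw [PySem.Set.mem_ofList]; simp [hc]
    rw [ha] at hx hcm
    simp at hx hcm
    rw [hcm, hx]
  · intro h
    have hmem : ∀ c ∈ PySem.Set.ofList (x :: xs), c = x := by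
      intro c hc
      rw [PySem.Set.mem_ofList] at hc
      rcases List.mem_cons.mp hc with h1 | h1
      · exact h1
      · exact h c h1
    have hx : x ∈ PySem.Set.ofList (x :: xs) := by
      rw [PySem.Set.mem_ofList]; simp
    have hnd : (PySem.Set.ofList (x :: xs)).Nodup := PySem.Set.nodup_ofList _
    cases hs : PySem.Set.ofList (x :: xs) with
    | nil => rw [hs] at hx; simp at hx
    | cons a t =>
      rw [hs] at hmem hnd
      have ha : a = x := hmem a (by simp)
      have ht : t = [] := by
        cases ht : t with
        | nil => rfl
        | cons b u =>
          exfalso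
          have hb : b = x := hmem b (by simp [ht])
          rw [ht, ha, hb] at hnd
          simp at hnd
      rw [ht]; rfl

-- The two equal-to-first formulations of 'repeated' agree.
theorem repeated_eq (x : Int) (xs : List Int) :
    ((PySem.Set.ofList (x :: xs)).length = 1) ↔ (xs.all (fun c => c == x) = true) := by
  rw [setLen_one]
  simp

theorem detect_eq (pc : List Int) :
    detect_melodic_patterns_py pc = detect_melodic_patterns_py_alt pc := by
  unfold detect_melodic_patterns_py detect_melodic_patterns_py_alt
  by_cases hlen : pc.length < 3
  · simp [hlen]
  · simp only [hlen, if_false]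
    cases pc with
    | nil => simp at hlen
    | cons x xs =>
      have hslice : PySem.List.slice (x :: xs) (some 1) none = xs := by
        simp [pysem]
      have hfirst : PySem.List.pyGetD (x :: xs) (0 : Int) 0 = x := by
        simp [pysem]
      rw [hslice, hfirst, foldFlags x xs x true true true true]
      simp only [Bool.true_and]
      have htail : (x :: xs).tail = xs := rfl
      rw [allAdj (fun a b => (!(a == b)) && decide (PySem.Int.mod (b - a) 12 ≤ 6)) (x :: xs)]
      rw [allAdj (fun a b => (!(a == b)) && decide (PySem.Int.mod (a - b) 12 ≤ 6)) (x :: xs)]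
      rw [allAdj (fun a b => (|PySem.Int.mod (b - a) 12| == 1) || (|PySem.Int.mod (a - b) 12| == 1)) (x :: xs)]
      rw [htail]
      have habs : (fun (p : Int × Int) => (|PySem.Int.mod (p.2 - p.1) 12| == 1) || (|PySem.Int.mod (p.1 - p.2) 12| == 1))
          = (fun (p : Int × Int) => (PySem.Int.mod (p.2 - p.1) 12 == 1) || (PySem.Int.mod (p.1 - p.2) 12 == 1)) := by
        funext p
        have h1 : 0 ≤ PySem.Int.mod (p.2 - p.1) 12 := PySem.Int.mod_nonneg _ (by norm_num)
        have h2 : 0 ≤ PySem.Int.mod (p.1 - p.2) 12 := PySem.Int.mod_nonneg _ (by norm_num)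
        rw [abs_of_nonneg h1, abs_of_nonneg h2]
      rw [habs]
      by_cases hrep : (PySem.Set.ofList (x :: xs)).length = 1
      · have : xs.all (fun c => c == x) = true := (repeated_eq x xs).mp hrep
        simp [hrep, this]
      · have : xs.all (fun c => c == x) = false := by
          rcases h : xs.all (fun c => c == x) with _ | _
          · rfl
          · exact absurd ((repeated_eq x xs).mpr h) hrep
        simp [hrep, this]

-- ===== VERDICT (by name: the statement is the Claim_ definition above) =====
theorem detect_melodic_patterns_py_spec : Claim_equal_detect_melodic_patterns_py := by
  intro pc _
  unfold Spec_detect_melodic_patterns_py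
  exact detect_eq pc
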